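-- pv_equiv track=rewrite | github.com/Yedil-Nauryzbek/Aidy | WpfApp1/PythonCore/aidy/config.py | is_wake_phrase
-- ===== SOURCE A (Python) =====
-- WAKE_KEYWORDS = {
--     "aidy",
--     "ady",
--     "hey",
--     "hey aidy",
--     "hey assistant",
--     "hello assistant",
--     "ok aidy",
--     "okay aidy",
--     "okay assistant",
--     "eddie",
--     "hey eddie",
--     "ok eddie",
--     "okay eddie",
--     "eighty",
--     "hey eighty",
--     "ok eighty",
--     "a d",
--     "id",
--     "edit",
-- }
--
-- def is_wake_phrase(text: str) -> bool:
--     t = (text or "").lower().strip()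
--     t = " ".join(t.split())
--     if len(t) < 3:
--         return False
--
--     if t in WAKE_KEYWORDS:
--         return True
--
--     for w in WAKE_KEYWORDS:
--         if w in t:
--             return True
--
--     return False
-- ===== SOURCE B (Python) =====
-- # Minimal "core" keywords: every wake keyword contains one of these as a substring,
-- # so substring search only needs this reduced set; scanned by one suffix sweep.
-- _CORE = ("a d", "ady", "eddie", "edit", "eighty",
--          "hello assistant", "hey", "id", "okay assistant")
--
-- def is_wake_phrase(text: str) -> bool:
--     t = (text or "").lower().strip()
--     t = " ".join(t.split())
--     if len(t) < 3:
--         return False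
--     suffix = t
--     while suffix:
--         if suffix.startswith(_CORE):
--             return True
--         suffix = suffix[1:]
--     return False
-- ===== Notes on version B (the rewrite author's own statement) =====
-- stated objective: alternative
-- what changed: The keyword set is pre-reduced to the 9 minimal keywords (those not containing another keyword), which is sound because exact match and containment of any keyword both imply containment of a minimal one; the membership branch and per-keyword substring loop are replaced by a single suffix sweep asking at each position whether a core keyword starts there.
import Mathlib
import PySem

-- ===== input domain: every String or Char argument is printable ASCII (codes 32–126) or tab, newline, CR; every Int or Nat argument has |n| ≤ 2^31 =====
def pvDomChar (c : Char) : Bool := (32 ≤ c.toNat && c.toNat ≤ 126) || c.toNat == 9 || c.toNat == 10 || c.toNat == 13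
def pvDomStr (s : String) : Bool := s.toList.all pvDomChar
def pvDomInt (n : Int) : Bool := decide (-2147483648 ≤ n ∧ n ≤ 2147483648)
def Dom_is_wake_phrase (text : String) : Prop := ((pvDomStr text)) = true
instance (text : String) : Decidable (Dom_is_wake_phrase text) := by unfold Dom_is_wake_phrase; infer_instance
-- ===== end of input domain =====

-- B pre-reduces the keyword set to the 9 minimal ones and replaces the membership test
-- plus per-keyword substring loop by one suffix sweep (objective: alternative).

-- ===== PORT A =====
-- WAKE_KEYWORDS set literal, in source order
def wakeKeywords : PySem.Set String := PySem.Set.ofList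
  ["aidy", "ady", "hey", "hey aidy", "hey assistant", "hello assistant",
   "ok aidy", "okay aidy", "okay assistant", "eddie", "hey eddie",
   "ok eddie", "okay eddie", "eighty", "hey eighty", "ok eighty",
   "a d", "id", "edit"]

def is_wake_phrase (text : String) : Bool :=
  -- (text or "") = text for every string argument
  let t0 := PySem.Str.strip (PySem.Str.lower text)
  let t := PySem.Str.join " " (PySem.Str.split₀ t0)
  if PySem.Str.len t < 3 then false
  else if PySem.Set.contains wakeKeywords t then true
  -- 'for w in WAKE_KEYWORDS: if w in t: return True' — result is order-independent, ported as any
  else wakeKeywords.any (fun w => PySem.Str.isIn w t)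

-- ===== PORT B =====
-- the reduced core keyword tuple _CORE
def coreList : List String :=
  ["a d", "ady", "eddie", "edit", "eighty",
   "hello assistant", "hey", "id", "okay assistant"]

-- the 'while suffix: if suffix.startswith(_CORE): return True; suffix = suffix[1:]' loop
def pvScan : List Char → Bool
  | [] => false
  | c :: rest =>
      if coreList.any (fun k => PySem.Chars.startswith (c :: rest) k.toList) then true
      else pvScan rest

def is_wake_phrase_alt (text : String) : Bool :=
  let t0 := PySem.Str.strip (PySem.Str.lower text)
  let t := PySem.Str.join " " (PySem.Str.split₀ t0)
  if PySem.Str.len t < 3 then false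
  else pvScan t.toList

-- ===== PRECONDITION & SPEC =====
def Spec_is_wake_phrase (text : String) (out : Bool) : Prop := out = is_wake_phrase_alt text
instance (text : String) (out : Bool) : Decidable (Spec_is_wake_phrase text out) := by unfold Spec_is_wake_phrase; infer_instance

-- ===== CLAIM =====
def Claim_equal_is_wake_phrase : Prop := ∀ (text : String), Dom_is_wake_phrase text → Spec_is_wake_phrase text (is_wake_phrase text)

-- ===== LEMMAS AND PROOFS =====

def wakeList : List String :=
  ["aidy", "ady", "hey", "hey aidy", "hey assistant", "hello assistant",
   "ok aidy", "okay aidy", "okay assistant", "eddie", "hey eddie",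
   "ok eddie", "okay eddie", "eighty", "hey eighty", "ok eighty",
   "a d", "id", "edit"]

theorem wakeKeywords_eq : wakeKeywords = wakeList := by decide

theorem core_ne_nil : ∀ k ∈ coreList, k.toList ≠ [] := by decide

theorem core_sub_wake : ∀ c ∈ coreList, c ∈ wakeList := by decide

theorem wake_covered : ∀ k ∈ wakeList, ∃ c ∈ coreList, c.toList <:+: k.toList := by decide

theorem pvScan_iff (cs : List Char) :
    pvScan cs = true ↔ ∃ k ∈ coreList, k.toList <:+: cs := by
  induction cs with
  | nil =>
      constructor
      · intro h; exact absurd h (by simp [pvScan])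
      · rintro ⟨k, hk, hinf⟩
        exact absurd (List.eq_nil_of_infix_nil hinf) (core_ne_nil k hk)
  | cons c rest ih =>
      rw [pvScan]
      by_cases h : coreList.any (fun k => PySem.Chars.startswith (c :: rest) k.toList) = true
      · rw [if_pos h]
        simp only [true_iff]
        rcases List.any_eq_true.mp h with ⟨k, hk, hp⟩
        refine ⟨k, hk, List.IsPrefix.isInfix ?_⟩
        exact List.isPrefixOf_iff_prefix.mp hp
      · rw [if_neg h, ih]
        constructor
        · rintro ⟨k, hk, hinf⟩
          exact ⟨k, hk, hinf.trans (List.infix_cons_iff.mpr (Or.inr (List.infix_refl rest)))⟩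
        · rintro ⟨k, hk, hinf⟩
          rcases List.infix_cons_iff.mp hinf with hpre | hinf'
          · exact absurd (List.any_eq_true.mpr ⟨k, hk, List.isPrefixOf_iff_prefix.mpr hpre⟩) h
          · exact ⟨k, hk, hinf'⟩

theorem aLoop_iff (t : String) :
    (PySem.Set.contains wakeKeywords t = true ∨
      wakeKeywords.any (fun w => PySem.Str.isIn w t) = true) ↔
    ∃ c ∈ coreList, c.toList <:+: t.toList := by
  rw [wakeKeywords_eq]
  constructor
  · rintro (hm | ha)
    · have ht : t ∈ wakeList := (PySem.Set.contains_iff _ _).mp hm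
      rcases wake_covered t ht with ⟨c, hc, hinf⟩
      exact ⟨c, hc, hinf⟩
    · rcases List.any_eq_true.mp ha with ⟨k, hk, hin⟩
      rcases wake_covered k hk with ⟨c, hc, hck⟩
      exact ⟨c, hc, hck.trans ((PySem.Str.isIn_iff_infix _ _).mp hin)⟩
  · rintro ⟨c, hc, hinf⟩
    exact Or.inr (List.any_eq_true.mpr
      ⟨c, core_sub_wake c hc, (PySem.Str.isIn_iff_infix _ _).mpr hinf⟩)

-- ===== VERDICT =====
theorem is_wake_phrase_spec : Claim_equal_is_wake_phrase := by
  intro text _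
  show is_wake_phrase text = is_wake_phrase_alt text
  unfold is_wake_phrase is_wake_phrase_alt
  dsimp only
  split_ifs with h1 h2
  · rfl
  · exact ((pvScan_iff _).mpr ((aLoop_iff _).mp (Or.inl h2))).symm
  · rw [Bool.eq_iff_iff, pvScan_iff, ← aLoop_iff]
    constructor
    · exact Or.inr
    · rintro (hm | ha)
      · exact absurd hm h2
      · exact ha
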